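-- pv_equiv track=rewrite | github.com/sigurdvaa/adventofcode | 2015/01-not-quite-lisp.py | target_floor
-- ===== SOURCE A (Python) =====
-- def target_floor(instructions: str):
--     floor = 0
--     for i in instructions:
--         if i == "(":
--             floor += 1
--         else:
--             floor -= 1
--     return floor
-- ===== SOURCE B (Python) =====
-- def target_floor(instructions: str):
--     ups = instructions.count("(")
--     return 2 * ups - len(instructions)
-- ===== Notes on version B (the rewrite author's own statement) =====
-- stated objective: faster
-- what changed: Replaces the per-character accumulator loop with a single C-level str.count of the up-character plus arithmetic, deriving down-steps as len minus ups to match A's else-branch on every other character.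
import Mathlib
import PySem

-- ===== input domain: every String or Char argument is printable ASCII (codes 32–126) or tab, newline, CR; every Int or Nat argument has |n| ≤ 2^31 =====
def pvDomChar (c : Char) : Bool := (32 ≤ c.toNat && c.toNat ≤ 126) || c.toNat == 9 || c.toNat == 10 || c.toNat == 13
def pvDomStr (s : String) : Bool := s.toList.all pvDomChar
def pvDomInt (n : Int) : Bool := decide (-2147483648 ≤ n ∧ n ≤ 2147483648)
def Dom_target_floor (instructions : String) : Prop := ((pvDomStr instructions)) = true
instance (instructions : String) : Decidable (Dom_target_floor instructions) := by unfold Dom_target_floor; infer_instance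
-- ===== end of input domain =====

-- B replaces A's per-character accumulator loop with one count('(') plus arithmetic (idiomatic).

-- ===== PORT A =====
-- for i in instructions: floor += 1 if i == "(" else floor -= 1
def target_floor (instructions : String) : Int :=
  instructions.toList.foldl (fun floor i => if i == '(' then floor + 1 else floor - 1) 0

-- ===== PORT B =====
-- ups = instructions.count("("); return 2 * ups - len(instructions)
def target_floor_alt (instructions : String) : Int :=
  let ups : Nat := PySem.Str.count instructions "("
  2 * (ups : Int) - PySem.Str.len instructions

-- ===== PRECONDITION & SPEC =====
def Spec_target_floor (instructions : String) (out : Int) : Prop := out = target_floor_alt instructions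
instance (instructions : String) (out : Int) : Decidable (Spec_target_floor instructions out) := by unfold Spec_target_floor; infer_instance

-- ===== CLAIM (what is proved, stated in full; the proofs are below) =====
def Claim_equal_target_floor : Prop := ∀ (instructions : String), Dom_target_floor instructions → Spec_target_floor instructions (target_floor instructions)

-- ===== LEMMAS AND PROOFS =====
lemma chars_count_go_single (c : Char) :
    ∀ (s : List Char) (fuel acc : Nat), s.length ≤ fuel →
      PySem.Chars.count.go [c] fuel s acc = acc + s.count c := by
  intro s
  induction s with
  | nil =>
    intro fuel acc _
    cases fuel <;> simp [PySem.Chars.count.go]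
  | cons h t ih =>
    intro fuel acc hle
    cases fuel with
    | zero => simp at hle
    | succ n =>
      by_cases hc : h = c
      · subst hc
        rw [show PySem.Chars.count.go [h] (n+1) (h :: t) acc
              = PySem.Chars.count.go [h] n t (acc + 1) by
            simp [PySem.Chars.count.go, List.isPrefixOf]]
        rw [ih n (acc + 1) (by simpa using hle)]
        simp
        omega
      · rw [show PySem.Chars.count.go [c] (n+1) (h :: t) acc
              = PySem.Chars.count.go [c] n t acc by
            simp [PySem.Chars.count.go, List.isPrefixOf, Ne.symm hc]]
        rw [ih n acc (by simpa using hle)]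
        simp [hc]

lemma chars_count_single (s : List Char) (c : Char) :
    PySem.Chars.count s [c] = s.count c := by
  simp only [PySem.Chars.count, List.isEmpty_cons, Bool.false_eq_true, reduceIte]
  rw [chars_count_go_single c s s.length 0 le_rfl]
  omega

lemma foldl_updown (l : List Char) (a : Int) :
    l.foldl (fun floor i => if i == '(' then floor + 1 else floor - 1) a
      = a + 2 * (l.count '(' : Int) - l.length := by
  induction l generalizing a with
  | nil => simp
  | cons h t ih =>
    rw [List.foldl_cons, ih]
    by_cases hc : h = '('
    · simp [hc]
      push_cast
      ring
    · simp [hc]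
      ring

-- ===== VERDICT (by name: the statement is the Claim_ definition above) =====
theorem target_floor_spec : Claim_equal_target_floor := by
  intro s _
  unfold Spec_target_floor target_floor target_floor_alt
  rw [foldl_updown]
  have hc : PySem.Str.count s "(" = s.toList.count '(' := by
    have := chars_count_single s.toList '('
    simpa [PySem.Str.count] using this
  simp only [hc, PySem.Str.len_eq]
  omega
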